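-- pv_equiv track=rewrite | github.com/cquliujian/Transformer-couplet | model_helper.py | id2sentence
-- ===== SOURCE A (Python) =====
-- def id2sentence(ids_list, vocdict):
--     # 将ids转化为句子
--
--     sentence = ""
--     for i in ids_list:
--         if i == 0 or i == 3:
--             return sentence
--         sentence += vocdict[i]
--     sentence+="\n"
--     return sentence
-- ===== SOURCE B (Python) =====
-- def id2sentence(ids_list, vocdict):
--     # Boundary-locating pass, then a separate string-building pass.
--     ids = list(ids_list)
--     idx = next((k for k, i in enumerate(ids) if i == 0 or i == 3), None)
--     if idx is None:
--         return "".join(vocdict[i] for i in ids) + "\n"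
--     return "".join(vocdict[i] for i in ids[:idx])
-- ===== Notes on version B (the rewrite author's own statement) =====
-- stated objective: alternative
-- what changed: Replaces A's single fused scan-and-accumulate loop with two separate passes: one pass locates the first sentinel (0 or 3), then a join builds the string over the whole list or the prefix, the newline decided by whether a sentinel was found.
import Mathlib
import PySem

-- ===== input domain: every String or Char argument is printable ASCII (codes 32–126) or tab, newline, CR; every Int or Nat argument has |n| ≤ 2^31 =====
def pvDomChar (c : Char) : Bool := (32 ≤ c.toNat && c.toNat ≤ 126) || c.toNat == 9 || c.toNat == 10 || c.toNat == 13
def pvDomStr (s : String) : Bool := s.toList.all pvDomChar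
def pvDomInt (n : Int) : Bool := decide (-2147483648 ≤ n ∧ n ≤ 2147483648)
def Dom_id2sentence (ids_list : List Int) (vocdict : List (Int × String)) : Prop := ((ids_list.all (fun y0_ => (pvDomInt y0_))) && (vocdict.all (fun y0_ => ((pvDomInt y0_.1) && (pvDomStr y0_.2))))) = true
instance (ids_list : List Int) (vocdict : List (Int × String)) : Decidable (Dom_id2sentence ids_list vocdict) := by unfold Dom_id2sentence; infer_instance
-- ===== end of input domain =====

-- B replaces A's fused scan-and-accumulate loop by a sentinel-locating pass followed by a
-- separate join over the prefix (alternative decomposition, same cost).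


-- shared dict lookup: Python's vocdict[i]; under Pre_ the key is present, the "" default is never used
def pvLook (vocdict : List (Int × String)) (i : Int) : String :=
  ((PySem.Dict.ofList vocdict).get? i).getD ""

-- ===== PORT A =====
-- the for-loop of A, carrying the accumulator `sentence`
def id2sentenceGo (vocdict : List (Int × String)) : List Int → String → String
  | [], sentence => sentence ++ "\n"
  | i :: t, sentence =>
      if i == 0 || i == 3 then sentence
      else id2sentenceGo vocdict t (sentence ++ pvLook vocdict i)

def id2sentence (ids_list : List Int) (vocdict : List (Int × String)) : String :=
  id2sentenceGo vocdict ids_list ""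

-- ===== PORT B =====
def id2sentence_alt (ids_list : List Int) (vocdict : List (Int × String)) : String :=
  match ids_list.findIdx? (fun i => i == 0 || i == 3) with
  | none => String.join (ids_list.map (pvLook vocdict)) ++ "\n"
  | some k => String.join ((ids_list.take k).map (pvLook vocdict))

-- ===== PRECONDITION & SPEC =====
-- Pre_ excludes exactly the inputs on which A raises KeyError: some id looked up before the
-- first sentinel (0 or 3) is missing from vocdict.
def Pre_id2sentence (ids_list : List Int) (vocdict : List (Int × String)) : Prop :=
  ∀ i ∈ ids_list.takeWhile (fun i => !(i == 0 || i == 3)),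
    (PySem.Dict.ofList vocdict).contains i = true
instance (ids_list : List Int) (vocdict : List (Int × String)) : Decidable (Pre_id2sentence ids_list vocdict) := by unfold Pre_id2sentence; infer_instance

def pvWitness_id2sentence : List Int × (List (Int × String)) :=
  ([1, 2, 0, 9], [(1, "a"), (2, "b")])

def Spec_id2sentence (ids_list : List Int) (vocdict : List (Int × String)) (out : String) : Prop := out = id2sentence_alt ids_list vocdict
instance (ids_list : List Int) (vocdict : List (Int × String)) (out : String) : Decidable (Spec_id2sentence ids_list vocdict out) := by unfold Spec_id2sentence; infer_instance

-- ===== CLAIM (what is proved, stated in full; the proofs are below) =====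
def Claim_equal_id2sentence : Prop := ∀ (ids_list : List Int) (vocdict : List (Int × String)), Dom_id2sentence ids_list vocdict → Pre_id2sentence ids_list vocdict → Spec_id2sentence ids_list vocdict (id2sentence ids_list vocdict)

-- ===== LEMMAS AND PROOFS =====

theorem pvJoinFrom (l : List String) : ∀ a : String,
    List.foldl (fun r s => r ++ s) a l = a ++ List.foldl (fun r s => r ++ s) "" l := by
  induction l with
  | nil => intro a; simp
  | cons x t ih =>
      intro a
      simp only [List.foldl]
      rw [ih (a ++ x), ih ("" ++ x)]
      simp [String.append_assoc]

theorem id2sentenceGo_eq (vocdict : List (Int × String)) :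
    ∀ (t : List Int) (s : String),
      id2sentenceGo vocdict t s =
        s ++ (match t.findIdx? (fun i => i == 0 || i == 3) with
              | none => String.join (t.map (pvLook vocdict)) ++ "\n"
              | some k => String.join ((t.take k).map (pvLook vocdict))) := by
  intro t
  induction t with
  | nil => intro s; simp [id2sentenceGo, String.join]
  | cons i t ih =>
      intro s
      by_cases h : (i == 0 || i == 3) = true
      · simp [id2sentenceGo, h, List.findIdx?_cons, String.join]
      · simp only [id2sentenceGo, h, List.findIdx?_cons, if_neg, Bool.not_eq_true] at *
        rw [ih]
        cases hf : t.findIdx? (fun i => i == 0 || i == 3) with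
        | none =>
            simp [String.join, String.append_assoc]
            rw [pvJoinFrom (List.map (pvLook vocdict) t) (pvLook vocdict i)]
            simp [String.append_assoc]
        | some k =>
            simp [String.join, String.append_assoc]
            rw [pvJoinFrom (List.take k (List.map (pvLook vocdict) t)) (pvLook vocdict i)]

-- ===== VERDICT (by name: the statement is the Claim_ definition above) =====
theorem id2sentence_spec : Claim_equal_id2sentence := by
  intro ids_list vocdict _ _
  unfold Spec_id2sentence id2sentence id2sentence_alt
  rw [id2sentenceGo_eq]
  cases ids_list.findIdx? (fun i => i == 0 || i == 3) <;> simp
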